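-- pv_equiv track=rewrite | github.com/ryan-ms-kang/tech_interview_practice | python_practice/dfs_bfs/dfs_bfs_q2.py | dfs
-- ===== SOURCE A (Python) =====
-- def dfs(grid, x, y):
--     kill_count = 0
--
--     # Top
--     for x2 in range(x - 1, -1, -1):
--         if grid[x2][y] == "E":
--             kill_count += 1
--         elif grid[x2][y] == "W":
--             break
--
--     # Bottom
--     for x2 in range(x + 1, len(grid)):
--         if grid[x2][y] == "E":
--             kill_count += 1
--         elif grid[x2][y] == "W":
--             break
--
--     # Left
--     for y2 in range(y - 1, -1, -1):
--         if grid[x][y2] == "E":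
--             kill_count += 1
--         elif grid[x][y2] == "W":
--             break
--
--     # Right
--     for y2 in range(y + 1, len(grid[0])):
--         if grid[x][y2] == "E":
--             kill_count += 1
--         elif grid[x][y2] == "W":
--             break
--
--     return kill_count
-- ===== SOURCE B (Python) =====
-- def _block_kills(line, i):
--     # Expand to the maximal wall-free block around position i, then count once.
--     lo = i
--     while lo > 0 and line[lo - 1] != "W":
--         lo -= 1
--     hi = i + 1
--     while hi < len(line) and line[hi] != "W":
--         hi += 1
--     return sum(c == "E" for c in line[lo:hi]) - (line[i] == "E")
--
--
-- def dfs(grid, x, y):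
--     return _block_kills(grid[x], y) + _block_kills([r[y] for r in grid], x)
-- ===== Notes on version B (the rewrite author's own statement) =====
-- stated objective: alternative
-- what changed: B expands to the maximal wall-free block around the position in the row and in the column (two boundary-finding while loops), counts enemies in each whole block once and subtracts the centre cell, instead of A's four direction-by-direction scans that count while walking and break on a wall.
-- outside the precondition, e.g. on dfs([['E'], ['S']], -1, 0): A returns 1, B returns 0; on dfs([['S'], ['S', 'E']], 0, 1): A returns 1, B raises IndexError; on dfs([['S'], ['S', 'E']], 1, 0): A returns 0, B returns 1
import Mathlib
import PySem

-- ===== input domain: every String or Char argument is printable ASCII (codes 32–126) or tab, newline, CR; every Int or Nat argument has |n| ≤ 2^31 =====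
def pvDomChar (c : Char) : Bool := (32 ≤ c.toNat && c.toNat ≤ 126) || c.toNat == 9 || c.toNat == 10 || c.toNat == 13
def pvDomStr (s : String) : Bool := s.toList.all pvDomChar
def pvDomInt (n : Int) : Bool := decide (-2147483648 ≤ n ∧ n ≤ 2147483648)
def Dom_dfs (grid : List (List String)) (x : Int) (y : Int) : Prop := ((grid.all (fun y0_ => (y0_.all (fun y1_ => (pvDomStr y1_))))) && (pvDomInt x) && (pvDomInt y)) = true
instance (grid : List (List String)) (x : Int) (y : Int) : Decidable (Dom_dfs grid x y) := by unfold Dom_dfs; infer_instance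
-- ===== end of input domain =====

-- B expands (y in the row, x in the column) to the maximal wall-free block around the
-- position and counts enemies in that block once, correcting for the centre cell,
-- instead of A's four direction-by-direction counting scans; objective: alternative (same cost).

-- ===== PORT A =====
-- grid[i][j]; exact within Pre_dfs, where every index A evaluates is in range
def pvCell (grid : List (List String)) (i j : Int) : String :=
  PySem.List.pyGetD (PySem.List.pyGetD grid i []) j ""

-- one of A's four for-loops: walk the index list, +1 on "E", break on "W"
def pvLoopA (idxs : List Int) (get : Int → String) (acc : Int) : Int :=
  match idxs with
  | [] => acc
  | i :: rest =>
    if get i = "E" then pvLoopA rest get (acc + 1)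
    else if get i = "W" then acc
    else pvLoopA rest get acc

def dfs (grid : List (List String)) (x : Int) (y : Int) : Int :=
  -- kill_count = 0; Top; Bottom; Left; Right
  let kc1 := pvLoopA (PySem.List.pyRange (x - 1) (-1) (-1)) (fun i => pvCell grid i y) 0
  let kc2 := pvLoopA (PySem.List.pyRange (x + 1) (grid.length : Int) 1) (fun i => pvCell grid i y) kc1
  let kc3 := pvLoopA (PySem.List.pyRange (y - 1) (-1) (-1)) (fun j => pvCell grid x j) kc2
  pvLoopA (PySem.List.pyRange (y + 1) ((PySem.List.pyGetD grid 0 []).length : Int) 1) (fun j => pvCell grid x j) kc3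

-- ===== PORT B =====
-- while lo > 0 and ln[lo-1] != "W": lo -= 1   (fuel = the positive part of lo; the
-- outer 'if' is the loop guard for a non-positive start)
def pvFindLoAux (ln : List String) : Nat → Int
  | 0 => 0
  | k + 1 => if PySem.List.pyGetD ln (k : Int) "" ≠ "W" then pvFindLoAux ln k else (k : Int) + 1

def pvFindLo (ln : List String) (lo : Int) : Int :=
  if lo ≤ 0 then lo else pvFindLoAux ln lo.toNat

-- while hi < len(ln) and ln[hi] != "W": hi += 1
def pvFindHi (ln : List String) (hi : Int) : Int :=
  if h : hi < (ln.length : Int) ∧ PySem.List.pyGetD ln hi "" ≠ "W" then pvFindHi ln (hi + 1)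
  else hi
termination_by (ln.length - hi).toNat
decreasing_by omega

-- sum(c == "E" for c in ln[lo:hi]) - (ln[i] == "E")
def pvBlockKills (ln : List String) (i : Int) : Int :=
  let lo := pvFindLo ln i
  let hi := pvFindHi ln (i + 1)
  ((PySem.List.slice ln (some lo) (some hi)).count "E" : Int)
    - (if PySem.List.pyGetD ln i "" = "E" then 1 else 0)

def dfs_alt (grid : List (List String)) (x : Int) (y : Int) : Int :=
  pvBlockKills (PySem.List.pyGetD grid x []) y
    + pvBlockKills (grid.map (fun r => PySem.List.pyGetD r y "")) x

-- ===== PRECONDITION & SPEC =====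
-- Pre_ restricts to the task's natural domain: 0 ≤ x < rows, 0 ≤ y, every row longer than y,
-- and row x as long as row 0 (the two horizontal bounds A walks). It excludes negative-index
-- wraparound positions, where A's returned value is an artefact of Python indexing, and
-- ragged grids, where B's column extraction raises IndexError (or, with row 0 shorter than
-- row x, A's right scan stops at row 0's length) while B reads the whole of row x.
def Pre_dfs (grid : List (List String)) (x : Int) (y : Int) : Prop :=
  0 ≤ x ∧ x < grid.length ∧ 0 ≤ y ∧ (∀ row ∈ grid, y < row.length) ∧
    (PySem.List.pyGetD grid 0 []).length = (PySem.List.pyGetD grid x []).length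
instance (grid : List (List String)) (x : Int) (y : Int) : Decidable (Pre_dfs grid x y) := by
  unfold Pre_dfs; infer_instance

def pvWitness_dfs : List (List String) × Int × Int := ([["E", "W"], ["S", "E"]], 0, 0)

def Spec_dfs (grid : List (List String)) (x : Int) (y : Int) (out : Int) : Prop := out = dfs_alt grid x y
instance (grid : List (List String)) (x : Int) (y : Int) (out : Int) : Decidable (Spec_dfs grid x y out) := by unfold Spec_dfs; infer_instance

-- ===== CLAIM (what is proved, stated in full; the proofs are below) =====
def Claim_equal_dfs : Prop := ∀ (grid : List (List String)) (x : Int) (y : Int), Dom_dfs grid x y → Pre_dfs grid x y → Spec_dfs grid x y (dfs grid x y)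

-- ===== LEMMAS AND PROOFS =====

-- count of "E" before the first "W" of a ray (proof-side characterisation of both programs)
def pvRayE (ray : List String) : Int := ((ray.takeWhile (· ≠ "W")).count "E" : Int)

-- A's loop on an index list, as pvRayE of the fetched cells
def pvKills (ray : List String) (n : Int) : Int :=
  match ray with
  | [] => n
  | c :: rest => if c = "W" then n else pvKills rest (if c = "E" then n + 1 else n)

theorem loopA_eq_kills (idxs : List Int) (get : Int → String) (acc : Int) :
    pvLoopA idxs get acc = pvKills (idxs.map get) acc := by
  induction idxs generalizing acc with
  | nil => rfl
  | cons i rest ih =>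
    simp only [pvLoopA, List.map, pvKills]
    by_cases hE : get i = "E"
    · simp [hE, ih]
    · by_cases hW : get i = "W" <;> simp [hE, hW, ih]

theorem kills_eq_rayE (ray : List String) (n : Int) : pvKills ray n = n + pvRayE ray := by
  induction ray generalizing n with
  | nil => simp [pvKills, pvRayE]
  | cons c rest ih =>
    simp only [pvKills, pvRayE, List.takeWhile]
    by_cases hW : c = "W"
    · simp [hW]
    · rw [if_neg hW, ih]
      by_cases hE : c = "E"
      · simp [hE, pvRayE]
        omega
      · simp [hE, hW, pvRayE]

theorem pyGetD_nil {α : Type} (i : Int) (d : α) : PySem.List.pyGetD ([] : List α) i d = d := by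
  simp [PySem.List.pyGetD, PySem.List.pyGet?, PySem.List.pyIdx?]

-- indexing the mapped column = mapping the indexed row (any i; both default correctly)
theorem cell_eq_col (grid : List (List String)) (i y : Int) :
    pvCell grid i y = PySem.List.pyGetD (grid.map (fun row => PySem.List.pyGetD row y "")) i "" := by
  have h := PySem.List.pyGetD_map (fun row => PySem.List.pyGetD row y "") grid i ([] : List String)
  simp only [pyGetD_nil] at h
  rw [pvCell, ← h]

-- range(k-1, -1, -1) fetches = reversed take k
theorem map_range_desc (k : Nat) (row : List String) (hk : k ≤ row.length) :
    (PySem.List.pyRange ((k : Int) - 1) (-1) (-1)).map (fun j => PySem.List.pyGetD row j "") =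
      (row.take k).reverse := by
  induction k with
  | zero => rw [PySem.List.pyRange_neg_one_eq_nil (by omega)]; simp
  | succ k ih =>
    have hc : ((k : Int) + 1 - 1) = (k : Int) := by omega
    rw [show ((k + 1 : Nat) : Int) - 1 = (k : Int) + 1 - 1 by push_cast; ring, hc,
        show (k : Int) = (k : Int) - 1 + 1 by ring,
        PySem.List.pyRange_neg_one_cons (by omega)]
    have hk' : k < row.length := by omega
    simp only [List.map_cons]
    rw [show (k : Int) - 1 + 1 = (k : Int) by ring, ih (by omega),
        PySem.List.pyGetD_natCast, List.getD_eq_getElem _ _ hk',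
        ← List.take_concat_get hk', List.concat_eq_append, List.reverse_append,
        List.reverse_singleton, List.singleton_append]

-- range(a, len, 1) fetches = drop a
theorem map_range_asc (a : Nat) (row : List String) :
    (PySem.List.pyRange (a : Int) (row.length : Int) 1).map (fun j => PySem.List.pyGetD row j "") =
      row.drop a := by
  by_cases h : row.length ≤ a
  · rw [PySem.List.pyRange_one_eq_nil (by omega)]
    simp [List.drop_eq_nil_of_le h]
  · have ha : a < row.length := by omega
    rw [PySem.List.pyRange_one_cons (by omega)]
    simp only [List.map_cons]
    rw [show (a : Int) + 1 = ((a + 1 : Nat) : Int) by push_cast; ring,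
        map_range_asc (a + 1) row,
        PySem.List.pyGetD_natCast, List.getD_eq_getElem _ _ ha,
        List.drop_eq_getElem_cons ha]
termination_by row.length - a

-- A as the sum of the four rays' counts
theorem dfs_eq_rays (grid : List (List String)) (k m : Nat)
    (hk : k < grid.length)
    (hm : ∀ row ∈ grid, m < row.length)
    (hb : (PySem.List.pyGetD grid 0 []).length = (PySem.List.pyGetD grid ((k : Nat) : Int) []).length) :
    dfs grid k m =
      pvRayE (((grid.map (fun row => PySem.List.pyGetD row (m : Int) "")).take k).reverse)
      + pvRayE ((grid.map (fun row => PySem.List.pyGetD row (m : Int) "")).drop (k + 1))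
      + pvRayE (((grid[k]'hk).take m).reverse)
      + pvRayE ((grid[k]'hk).drop (m + 1)) := by
  have hrowk : PySem.List.pyGetD grid ((k : Nat) : Int) [] = grid[k]'hk := by
    rw [PySem.List.pyGetD_natCast, List.getD_eq_getElem _ _ hk]
  have hm' : m < (grid[k]'hk).length := hm _ (List.getElem_mem hk)
  unfold dfs
  simp only [loopA_eq_kills]
  have hcells : (fun i => pvCell grid i ((m : Nat) : Int)) =
      (fun i => PySem.List.pyGetD (grid.map (fun row => PySem.List.pyGetD row ((m : Nat) : Int) "")) i "") :=
    funext fun i => cell_eq_col grid i _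
  have hrowcells : (fun j => pvCell grid ((k : Nat) : Int) j) =
      (fun j => PySem.List.pyGetD (grid[k]'hk) j "") :=
    funext fun j => by rw [pvCell, hrowk]
  have hbound : ((PySem.List.pyGetD grid 0 []).length : Int) = ((grid[k]'hk).length : Int) := by
    rw [hb, hrowk]
  have hglen : ((grid.length : Nat) : Int) =
      (((grid.map (fun row => PySem.List.pyGetD row ((m : Nat) : Int) "")).length : Nat) : Int) := by simp
  rw [hcells, hrowcells, hbound, hglen]
  rw [kills_eq_rayE, kills_eq_rayE, kills_eq_rayE, kills_eq_rayE]
  rw [map_range_desc k _ (by simpa using hk.le),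
      show ((k : Nat) : Int) + 1 = (((k + 1 : Nat) : Nat) : Int) by push_cast; ring,
      map_range_asc (k + 1) _,
      map_range_desc m _ hm'.le,
      show ((m : Nat) : Int) + 1 = (((m + 1 : Nat) : Nat) : Int) by push_cast; ring,
      map_range_asc (m + 1) _]
  ring

-- findLo lands a block-length left of m
theorem findLoAux_eq (ln : List String) (m : Nat) (hm : m ≤ ln.length) :
    pvFindLoAux ln m =
      ((m : Int) - (((ln.take m).reverse.takeWhile (· ≠ "W")).length : Int)) := by
  induction m with
  | zero => simp [pvFindLoAux]
  | succ k ih =>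
    have hk : k < ln.length := by omega
    have hget : PySem.List.pyGetD ln (k : Int) "" = ln[k]'hk := by
      rw [PySem.List.pyGetD_natCast, List.getD_eq_getElem _ _ hk]
    simp only [pvFindLoAux, hget]
    rw [← List.take_concat_get hk, List.concat_eq_append, List.reverse_append,
        List.reverse_singleton, List.singleton_append, List.takeWhile_cons]
    by_cases hW : ln[k]'hk = "W"
    · rw [if_neg (by simp [hW]), if_neg (by simp [hW])]
      simp
    · rw [if_pos hW, if_pos (by simp [hW]), ih (by omega)]
      simp only [List.length_cons]
      push_cast; ring

-- findHi lands a block-length right of the start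
theorem findHi_eq (ln : List String) (s : Nat) :
    pvFindHi ln (s : Int) =
      ((s : Int) + (((ln.drop s).takeWhile (· ≠ "W")).length : Int)) := by
  by_cases h : s < ln.length
  · have hget : PySem.List.pyGetD ln (s : Int) "" = ln[s]'h := by
      rw [PySem.List.pyGetD_natCast, List.getD_eq_getElem _ _ h]
    rw [pvFindHi]
    rw [List.drop_eq_getElem_cons h, List.takeWhile_cons]
    by_cases hW : ln[s]'h = "W"
    · rw [dif_neg (by simp [hget, hW]), if_neg (by simp [hW])]
      simp
    · rw [dif_pos ⟨by exact_mod_cast h, by simp [hget, hW]⟩,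
          show (s : Int) + 1 = ((s + 1 : Nat) : Int) by push_cast; ring,
          findHi_eq ln (s + 1), if_pos (by simp [hW])]
      simp only [List.length_cons]
      push_cast; ring
  · rw [pvFindHi, dif_neg (by omega)]
    simp [List.drop_eq_nil_of_le (by omega : ln.length ≤ s)]
termination_by ln.length - s

-- the block around m, counted once, is the two rays plus the centre
theorem blockKills_eq (ln : List String) (m : Nat) (hm : m < ln.length) :
    pvBlockKills ln (m : Int) =
      pvRayE ((ln.take m).reverse) + pvRayE (ln.drop (m + 1)) := by
  have hget : PySem.List.pyGetD ln (m : Int) "" = ln[m]'hm := by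
    rw [PySem.List.pyGetD_natCast, List.getD_eq_getElem _ _ hm]
  set L := (ln.take m).reverse.takeWhile (· ≠ "W") with hL
  set R := (ln.drop (m + 1)).takeWhile (· ≠ "W") with hR
  have hLa : L.length ≤ m := by
    have h1 : L.length ≤ (ln.take m).reverse.length := by
      rw [hL]; exact List.IsPrefix.length_le (List.takeWhile_prefix _)
    simp at h1; omega
  have hRb : R.length ≤ ln.length - (m + 1) := by
    have h1 : R.length ≤ (ln.drop (m + 1)).length := by
      rw [hR]; exact List.IsPrefix.length_le (List.takeWhile_prefix _)
    simp at h1; omega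
  -- lo and hi as naturals
  have hlo : pvFindLo ln (m : Int) = ((m - L.length : Nat) : Int) := by
    unfold pvFindLo
    by_cases h0 : (m : Int) ≤ 0
    · have : m = 0 := by omega
      subst this
      simp at hLa
      simp [hLa]
    · rw [if_neg h0, Int.toNat_natCast, findLoAux_eq ln m hm.le, ← hL]
      omega
  have hhi : pvFindHi ln ((m : Int) + 1) = (((m + 1) + R.length : Nat) : Int) := by
    rw [show (m : Int) + 1 = ((m + 1 : Nat) : Int) by push_cast; ring,
        findHi_eq ln (m + 1), ← hR]
    push_cast; ring
  -- the sliced block decomposes as L.reverse ++ [ln[m]] ++ R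
  have hLpref : (ln.take m).reverse = L ++ ((ln.take m).reverse.dropWhile (· ≠ "W")) := by
    rw [hL, List.takeWhile_append_dropWhile]
  have hLsuffix : (ln.take m).drop (m - L.length) = L.reverse := by
    have h1 : ln.take m = ((ln.take m).reverse.dropWhile (· ≠ "W")).reverse ++ L.reverse := by
      rw [← List.reverse_append, ← hLpref, List.reverse_reverse]
    rw [h1, List.drop_append]
    have hlen : (((ln.take m).reverse.dropWhile (· ≠ "W")).reverse).length = m - L.length := by
      have := congrArg List.length hLpref
      simp [List.length_take, Nat.min_eq_left hm.le] at this ⊢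
      omega
    rw [hlen, Nat.sub_self, List.drop_zero, List.drop_eq_nil_of_le (Nat.le_of_eq hlen),
        List.nil_append]
  have hRtake : (ln.drop (m + 1)).take R.length = R := by
    have : R <+: ln.drop (m + 1) := hR ▸ List.takeWhile_prefix _
    exact (List.prefix_iff_eq_take.mp this).symm
  have hdrop : ln.drop (m - L.length) =
      L.reverse ++ (ln[m]'hm :: ln.drop (m + 1)) := by
    have h2 : ln.drop (m - L.length) = (ln.take m).drop (m - L.length) ++ ln.drop m := by
      conv_lhs => rw [← List.take_append_drop m ln]
      rw [List.drop_append]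
      have : (ln.take m).length = m := by simp [List.length_take, Nat.min_eq_left hm.le]
      rw [this, List.drop_drop]
      congr 2
      omega
    rw [h2, hLsuffix, List.drop_eq_getElem_cons hm]
  have hslice : PySem.List.slice ln (some ((m - L.length : Nat) : Int))
        (some (((m + 1) + R.length : Nat) : Int)) =
      L.reverse ++ (ln[m]'hm :: R) := by
    rw [PySem.List.slice_natCast, hdrop]
    rw [List.take_append]
    have hLl : L.reverse.length = L.length := by simp
    have harith : ((m + 1) + R.length) - (m - L.length) = L.length + (1 + R.length) := by omega
    rw [harith, hLl]
    have : L.length + (1 + R.length) - L.length = 1 + R.length := by omega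
    rw [List.take_of_length_le (by simp), this]
    congr 1
    rw [show 1 + R.length = R.length + 1 from by omega, List.take_succ_cons, hRtake]
  -- put it together
  unfold pvBlockKills
  rw [hlo, hhi]
  dsimp only
  rw [hslice, hget]
  have hcL : pvRayE ((ln.take m).reverse) = (L.count "E" : Int) := by rw [pvRayE, ← hL]
  have hcR : pvRayE (ln.drop (m + 1)) = (R.count "E" : Int) := by rw [pvRayE, ← hR]
  rw [hcL, hcR]
  simp only [List.count_append, List.count_cons, List.count_reverse]
  by_cases hE : ln[m]'hm = "E"
  · simp [hE]
    ring
  · simp [hE]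

-- ===== VERDICT (by name: the statement is the Claim_ definition above) =====
theorem dfs_spec : Claim_equal_dfs := by
  unfold Claim_equal_dfs
  intro grid x y _ hpre
  obtain ⟨hx0, hxl, hy0, hyrows, hb⟩ := hpre
  obtain ⟨k, rfl⟩ := Int.eq_ofNat_of_zero_le hx0
  obtain ⟨m, rfl⟩ := Int.eq_ofNat_of_zero_le hy0
  have hk : k < grid.length := by exact_mod_cast hxl
  have hm : ∀ row ∈ grid, m < row.length := by
    intro row hrow; exact_mod_cast hyrows row hrow
  have hrowk : PySem.List.pyGetD grid ((k : Nat) : Int) [] = grid[k]'hk := by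
    rw [PySem.List.pyGetD_natCast, List.getD_eq_getElem _ _ hk]
  unfold Spec_dfs dfs_alt
  rw [dfs_eq_rays grid k m hk hm hb, hrowk]
  have hmrow : m < (grid[k]'hk).length := hm _ (List.getElem_mem hk)
  have hkcol : k < (grid.map (fun r => PySem.List.pyGetD r ((m : Nat) : Int) "")).length := by
    simpa using hk
  rw [blockKills_eq _ m hmrow, blockKills_eq _ k (by simpa using hk)]
  ring
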